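-- pv_equiv track=rewrite | github.com/OtherBarry/advent-of-code | solutions/Y25/day03.py | get_max_digit_and_index
-- ===== SOURCE A (Python) =====
-- from collections.abc import Sequence
--
-- def get_max_digit_and_index(digits: Sequence[int]) -> tuple[int, int]:
--     max_value = digits[0]
--     max_index = 0
--     for i in range(1, len(digits)):
--         if digits[i] > max_value:
--             max_value = digits[i]
--             max_index = i
--     return max_index, max_value
-- ===== SOURCE B (Python) =====
-- def get_max_digit_and_index(digits):
--     max_value = max(digits)
--     return digits.index(max_value), max_value
-- ===== Notes on version B (the rewrite author's own statement) =====
-- stated objective: simpler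
-- what changed: Replaces A's hand-written index-tracking loop with two library passes: max(digits) then digits.index(max_value), which yields the same first-occurrence index.
import Mathlib
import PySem

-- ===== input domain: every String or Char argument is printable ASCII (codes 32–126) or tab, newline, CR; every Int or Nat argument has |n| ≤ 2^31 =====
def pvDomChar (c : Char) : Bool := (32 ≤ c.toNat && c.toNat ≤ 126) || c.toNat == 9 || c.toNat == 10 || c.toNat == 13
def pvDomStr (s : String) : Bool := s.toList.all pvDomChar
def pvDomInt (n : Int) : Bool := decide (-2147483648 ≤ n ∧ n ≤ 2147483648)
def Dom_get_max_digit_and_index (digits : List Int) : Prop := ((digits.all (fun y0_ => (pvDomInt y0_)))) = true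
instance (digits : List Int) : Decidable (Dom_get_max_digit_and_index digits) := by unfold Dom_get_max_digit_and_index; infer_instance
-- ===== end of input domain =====

-- B replaces A's hand-written tracking loop with two library passes (max, then first index of it); same cost, simpler.

-- ===== PORT A =====
-- digits[0] and digits[i]: i is always in range here (Pre_ gives digits ≠ [], the loop runs over
-- range(1, len(digits))), so pyGetD with default 0 is exact on every admitted input.
def get_max_digit_and_index (digits : List Int) : Int × Int :=
  let max_value := PySem.List.pyGetD digits 0 0
  let st := (PySem.List.pyRange 1 (PySem.List.len digits) 1).foldl
    (fun (s : Int × Int) i =>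
      if PySem.List.pyGetD digits i 0 > s.2 then (i, PySem.List.pyGetD digits i 0) else s)
    ((0 : Int), max_value)
  st

-- ===== PORT B =====
-- max(digits) → PySem.List.max? (first extremal element, as Python); digits.index(v) → PySem.List.index?.
-- On [] Python B raises ValueError (max? = none); the (0,0)/getD fallbacks are unreachable under Pre_.
def get_max_digit_and_index_alt (digits : List Int) : Int × Int :=
  match PySem.List.max? digits (fun y => y) with
  | none => (0, 0)
  | some m => (((PySem.List.index? digits m).getD 0 : Nat), m)

-- ===== PRECONDITION & SPEC =====
-- Pre_ excludes only the empty list, on which A raises IndexError (and B raises ValueError).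
def Pre_get_max_digit_and_index (digits : List Int) : Prop := digits ≠ []
instance (digits : List Int) : Decidable (Pre_get_max_digit_and_index digits) := by unfold Pre_get_max_digit_and_index; infer_instance
def pvWitness_get_max_digit_and_index : List Int := [3, 1, 4, 1, 5]

def Spec_get_max_digit_and_index (digits : List Int) (out : Int × Int) : Prop := out = get_max_digit_and_index_alt digits
instance (digits : List Int) (out : Int × Int) : Decidable (Spec_get_max_digit_and_index digits out) := by unfold Spec_get_max_digit_and_index; infer_instance

-- ===== CLAIM (what is proved, stated in full; the proofs are below) =====
def Claim_equal_get_max_digit_and_index : Prop := ∀ (digits : List Int), Dom_get_max_digit_and_index digits → Pre_get_max_digit_and_index digits → Spec_get_max_digit_and_index digits (get_max_digit_and_index digits)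

-- ===== LEMMAS AND PROOFS =====

-- A's loop on x :: t computes (first index of the max, max), with max = t.foldl max x.
theorem aux_loop (x : Int) (t : List Int) :
    (PySem.List.pyRange 1 (PySem.List.len (x :: t)) 1).foldl
      (fun (s : Int × Int) i =>
        if PySem.List.pyGetD (x :: t) i 0 > s.2 then (i, PySem.List.pyGetD (x :: t) i 0) else s)
      ((0 : Int), x)
    = ((((PySem.List.index? (x :: t) (t.foldl max x)).getD 0 : Nat) : Int), t.foldl max x) := by
  induction t using List.reverseRecOn with
  | nil =>
    simp [PySem.List.pyRange_one_eq_nil, PySem.List.len]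
  | append_singleton s y ih =>
    have hlen : PySem.List.len (x :: (s ++ [y])) = PySem.List.len (x :: s) + 1 := by
      simp only [PySem.List.len_eq, List.length_cons, List.length_append, List.length_nil]
      omega
    have hge1 : (1 : Int) ≤ PySem.List.len (x :: s) := by
      simp only [PySem.List.len_eq, List.length_cons]; omega
    rw [hlen, PySem.List.pyRange_one_succ_right hge1, List.foldl_append]
    have hcongr :
        (PySem.List.pyRange 1 (PySem.List.len (x :: s)) 1).foldl
          (fun (st : Int × Int) i =>
            if PySem.List.pyGetD (x :: (s ++ [y])) i 0 > st.2 then (i, PySem.List.pyGetD (x :: (s ++ [y])) i 0) else st)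
          ((0 : Int), x)
        = (PySem.List.pyRange 1 (PySem.List.len (x :: s)) 1).foldl
          (fun (st : Int × Int) i =>
            if PySem.List.pyGetD (x :: s) i 0 > st.2 then (i, PySem.List.pyGetD (x :: s) i 0) else st)
          ((0 : Int), x) := by
      apply PySem.List.foldl_congr_mem
      intro acc i hi
      rw [PySem.List.mem_pyRange_one] at hi
      obtain ⟨hi1, hi2⟩ := hi
      rw [PySem.List.len_eq] at hi2
      have hlt : i.toNat < (x :: s).length := by omega
      have hget : PySem.List.pyGetD (x :: (s ++ [y])) i 0 = PySem.List.pyGetD (x :: s) i 0 := by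
        have hi' : i = (i.toNat : Int) := (Int.toNat_of_nonneg (by omega)).symm
        rw [hi', PySem.List.pyGetD_natCast, PySem.List.pyGetD_natCast]
        show ((x :: s) ++ [y]).getD i.toNat 0 = (x :: s).getD i.toNat 0
        rw [List.getD_eq_getElem?_getD, List.getD_eq_getElem?_getD,
            List.getElem?_append_left hlt]
      rw [hget]
    rw [hcongr, ih]
    have hgety : PySem.List.pyGetD (x :: (s ++ [y])) (PySem.List.len (x :: s)) 0 = y := by
      rw [PySem.List.len_eq, PySem.List.pyGetD_natCast]
      show ((x :: s) ++ [y]).getD (x :: s).length 0 = y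
      simp [List.getD_eq_getElem?_getD]
    simp only [List.foldl_cons, List.foldl_nil, hgety]
    set m := s.foldl max x with hm
    have hmax : (s ++ [y]).foldl max x = max m y := by simp [hm]
    by_cases hc : y > m
    · simp only [if_pos hc, hmax]
      have hmaxy : max m y = y := by omega
      have hynotin : y ∉ (x :: s) := by
        intro hmem
        have := (PySem.List.le_foldl_max s x).2
        have hx := (PySem.List.le_foldl_max s x).1
        rcases List.mem_cons.mp hmem with h | h
        · omega
        · have := this y h; omega
      rw [hmaxy]
      have h2 : PySem.List.index? (x :: (s ++ [y])) y = some (x :: s).length :=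
        PySem.List.index?_append_singleton_self (x :: s) y hynotin
      rw [h2]
      simp [PySem.List.len_eq]
    · simp only [if_neg hc, hmax]
      have hmaxm : max m y = m := by omega
      have hmin : m ∈ (x :: s) := by
        rcases PySem.List.foldl_max_mem s x with h | h
        · rw [hm, h]; exact List.mem_cons_self
        · exact List.mem_cons_of_mem _ h
      rw [hmaxm]
      have h2 : PySem.List.index? (x :: (s ++ [y])) m = PySem.List.index? (x :: s) m :=
        PySem.List.index?_append_of_mem [y] hmin
      rw [h2]

-- ===== VERDICT (by name: the statement is the Claim_ definition above) =====
theorem get_max_digit_and_index_spec : Claim_equal_get_max_digit_and_index := by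
  intro digits _ hpre
  unfold Spec_get_max_digit_and_index
  match digits with
  | [] => exact absurd rfl hpre
  | x :: t =>
    unfold get_max_digit_and_index get_max_digit_and_index_alt
    rw [PySem.List.max?_id_cons]
    rw [show PySem.List.pyGetD (x :: t) 0 0 = x from PySem.List.pyGetD_zero_cons x t 0]
    exact aux_loop x t
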